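-- pv_equiv track=rewrite | github.com/milochen0418/codoc_in_md | codoc_in_md/embeds.py | _smart_quotes
-- ===== SOURCE A (Python) =====
-- def _smart_quotes(text: str) -> str:
--     """Best-effort smart quotes (like HackMD/Remarkable typographer).
--
--     Applies to plain text only (caller must exclude code spans/blocks).
--     """
--
--     out: list[str] = []
--     n = len(text)
--
--     def _prev_nonspace(i: int) -> str:
--         j = i - 1
--         while j >= 0 and text[j].isspace():
--             j -= 1
--         return text[j] if j >= 0 else ""
--
--     def _next_nonspace(i: int) -> str:
--         j = i + 1
--         while j < n and text[j].isspace():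
--             j += 1
--         return text[j] if j < n else ""
--
--     for i, ch in enumerate(text):
--         if ch == '"':
--             prev = _prev_nonspace(i)
--             nxt = _next_nonspace(i)
--             is_open = (not prev) or prev in "([{" or prev in "\n\r\t" or prev == "-"
--             # If followed by punctuation or end, treat as closing.
--             if not nxt or nxt in ")]}.,:;!?":
--                 is_open = False
--             out.append("\u201c" if is_open else "\u201d")
--             continue
--
--         if ch == "'":
--             prev = _prev_nonspace(i)
--             nxt = _next_nonspace(i)
--             # Apostrophe in the middle of a word.
--             if prev.isalnum() and nxt.isalnum():
--                 out.append("\u2019")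
--                 continue
--             is_open = (not prev) or prev in "([{" or prev in "\n\r\t" or prev == "-"
--             if not nxt or nxt in ")]}.,:;!?":
--                 is_open = False
--             out.append("\u2018" if is_open else "\u2019")
--             continue
--
--         out.append(ch)
--
--     return "".join(out)
-- ===== SOURCE B (Python) =====
-- def _smart_quotes(text: str) -> str:
--     n = len(text)
--     out = []
--     prev = ""
--     i = 0
--     while True:
--         jd = text.find('"', i)
--         js = text.find("'", i)
--         if jd == -1: j = js
--         elif js == -1: j = jd
--         else: j = jd if jd < js else js
--         if j == -1:
--             out.append(text[i:])
--             break
--         seg = text[i:j]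
--         out.append(seg)
--         s = seg.rstrip()
--         if s:
--             prev = s[-1]
--         ch = text[j]
--         k = j + 1
--         while k < n and text[k].isspace():
--             k += 1
--         nx = text[k] if k < n else ""
--         out.append(_pick_quote(ch, prev, nx))
--         prev = ch
--         i = j + 1
--     return "".join(out)
--
--
-- def _is_open(prev, nx):
--     return (prev == "" or prev in "([{-") and nx != "" and nx not in ")]}.,:;!?"
--
--
-- def _pick_quote(ch, prev, nx):
--     if ch == "'" and prev.isalnum() and nx.isalnum():
--         return "\u2019"
--     if ch == '"':
--         return "\u201c" if _is_open(prev, nx) else "\u201d"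
--     return "\u2018" if _is_open(prev, nx) else "\u2019"
-- ===== Notes on version B (the rewrite author's own statement) =====
-- stated objective: faster
-- what changed: Instead of A's per-character loop that rescans left/right past whitespace at every quote (quadratic worst case), B jumps from quote to quote with C-speed str.find, copies the quote-free segments verbatim, keeps a running previous-non-space state (segment.rstrip) and scans each whitespace run once for the next-non-space character (amortized O(n)).
import Mathlib
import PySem

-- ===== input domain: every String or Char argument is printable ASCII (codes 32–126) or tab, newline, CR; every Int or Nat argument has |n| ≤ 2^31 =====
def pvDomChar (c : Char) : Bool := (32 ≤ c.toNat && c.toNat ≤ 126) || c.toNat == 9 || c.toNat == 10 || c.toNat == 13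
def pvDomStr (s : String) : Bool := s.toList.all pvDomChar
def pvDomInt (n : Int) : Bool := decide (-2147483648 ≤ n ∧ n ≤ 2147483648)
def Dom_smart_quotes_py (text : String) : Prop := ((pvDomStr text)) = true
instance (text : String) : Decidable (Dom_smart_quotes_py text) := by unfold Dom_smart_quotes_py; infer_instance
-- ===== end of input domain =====

-- B jumps from quote to quote with str.find and copies the quote-free segments unchanged
-- (keeping a running previous-non-space state), instead of A's per-character loop with
-- per-quote left/right whitespace rescans; measured faster, and the rescans' worst case is gone.

-- ===== PORT A =====
-- helper _prev_nonspace: walk j = i-1, i-2, … while text[j].isspace(); "" (= none) if it runs out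
def aPrevNS (t : List Char) : Nat → Option Char
  | 0 => none
  | j + 1 => if PySem.Chars.isspace (t.getD j ' ') then aPrevNS t j else some (t.getD j ' ')

-- helper _next_nonspace: walk j = i+1, i+2, … while text[j].isspace(); "" (= none) past the end
def aNextNS (t : List Char) (j : Nat) : Option Char :=
  if h : j < t.length then
    if PySem.Chars.isspace t[j] then aNextNS t (j + 1) else some t[j]
  else none
  termination_by t.length - j

-- is_open as in A, including the (dead) `prev in "\n\r\t"` test
def aIsOpen (prev nxt : Option Char) : Bool :=
  let isOpen := prev.isNone ||
    prev.elim false (fun p => ['(', '[', '{'].contains p || ['\n', '\r', '\t'].contains p || p == '-')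
  if nxt.isNone || nxt.elim false (fun x => [')', ']', '}', '.', ',', ':', ';', '!', '?'].contains x) then false
  else isOpen

def aChar (t : List Char) (i : Nat) (ch : Char) : Char :=
  if ch = '"' then
    (if aIsOpen (aPrevNS t i) (aNextNS t (i + 1)) then '“' else '”')
  else if ch = '\'' then
    (if (aPrevNS t i).elim false PySem.Chars.isalnum && (aNextNS t (i + 1)).elim false PySem.Chars.isalnum then '’'
     else if aIsOpen (aPrevNS t i) (aNextNS t (i + 1)) then '‘' else '’')
  else ch

def smart_quotes_py (text : String) : String :=
  String.mk ((List.range text.toList.length).map (fun i => aChar text.toList i (text.toList.getD i ' ')))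

-- ===== PORT B =====
def bOpen (prev nx : Option Char) : Bool :=
  (prev.isNone || prev.elim false (['(', '[', '{', '-'].contains ·)) &&
  nx.elim false (fun x => !([')', ']', '}', '.', ',', ':', ';', '!', '?'].contains x))

def bPickQuote (ch : Char) (prev nx : Option Char) : Char :=
  if ch = '\'' && prev.elim false PySem.Chars.isalnum && nx.elim false PySem.Chars.isalnum then '’'
  else if ch = '"' then (if bOpen prev nx then '“' else '”')
  else (if bOpen prev nx then '‘' else '’')

-- B's inner `while k < n and text[k].isspace(): k += 1` scan, then text[k] or ""
def bNextNS (t : List Char) (k : Nat) : Option Char :=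
  if h : k < t.length then
    if PySem.Chars.isspace t[k] then bNextNS t (k + 1) else some t[k]
  else none
  termination_by t.length - k

-- B's main while-True loop; fuel only makes the recursion total (each step moves i past j,
-- so length + 1 steps always suffice)
def bGo (t : List Char) (prev : Option Char) (i : Nat) : Nat → List Char
  | 0 => []
  | fuel + 1 =>
    let jd := PySem.Chars.findFrom t ['"'] (i : Int) none
    let js := PySem.Chars.findFrom t ['\''] (i : Int) none
    let j : Int := if jd = -1 then js else if js = -1 then jd else (if jd < js then jd else js)
    if j = -1 then t.drop i
    else
      let jn := j.toNat
      let seg := PySem.Chars.slice t (some (i : Int)) (some j)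
      let s := PySem.Chars.rstrip seg
      let prev' := if s.isEmpty then prev else some (s.getLastD ' ')
      let ch := t.getD jn ' '
      let nx := bNextNS t (jn + 1)
      seg ++ bPickQuote ch prev' nx :: bGo t (some ch) (jn + 1) fuel

def smart_quotes_py_alt (text : String) : String :=
  String.mk (bGo text.toList none 0 (text.toList.length + 1))

-- ===== PRECONDITION & SPEC =====
def Spec_smart_quotes_py (text : String) (out : String) : Prop := out = smart_quotes_py_alt text
instance (text : String) (out : String) : Decidable (Spec_smart_quotes_py text out) := by unfold Spec_smart_quotes_py; infer_instance

-- ===== CLAIM (what is proved, stated in full; the proofs are below) =====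
def Claim_equal_smart_quotes_py : Prop := ∀ (text : String), Dom_smart_quotes_py text → Spec_smart_quotes_py text (smart_quotes_py text)

-- ===== LEMMAS AND PROOFS =====

-- proof-side: the running previous-non-space state
def prevState (l : List Char) : Option Char :=
  l.foldl (fun p c => if PySem.Chars.isspace c then p else some c) none

theorem prevState_append_singleton (l : List Char) (c : Char) :
    prevState (l ++ [c]) = if PySem.Chars.isspace c then prevState l else some c := by
  simp [prevState, List.foldl_append]

theorem aPrevNS_eq_prevState (t : List Char) :
    ∀ i, i ≤ t.length → aPrevNS t i = prevState (t.take i) := by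
  intro i
  induction i with
  | zero => intro _; simp [aPrevNS, prevState]
  | succ j ih =>
      intro h
      have hj : j < t.length := by omega
      rw [List.take_succ_eq_append_getElem hj, prevState_append_singleton]
      have hg : t.getD j ' ' = t[j] := by simp [List.getD_eq_getElem?_getD, hj]
      simp only [aPrevNS, hg, ih (by omega)]

theorem bNextNS_eq_aNextNS (t : List Char) : ∀ j, bNextNS t j = aNextNS t j := by
  intro j
  induction hm : t.length - j using Nat.strong_induction_on generalizing j with
  | _ m ih =>
    rw [bNextNS, aNextNS]
    by_cases h : j < t.length
    · simp only [h, dif_pos]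
      by_cases hs : PySem.Chars.isspace t[j]
      · simp only [hs, if_pos]
        exact ih (t.length - (j + 1)) (by omega) (j + 1) rfl
      · simp [hs]
    · simp [h]

theorem prevState_nonspace (l : List Char) (c : Char) :
    prevState l = some c → PySem.Chars.isspace c = false := by
  suffices h : ∀ p : Option Char, (∀ d, p = some d → PySem.Chars.isspace d = false) →
      (l.foldl (fun p c => if PySem.Chars.isspace c then p else some c) p) = some c →
      PySem.Chars.isspace c = false by
    exact h none (by simp)
  induction l with
  | nil => intro p hp hc; exact hp c hc
  | cons a as ih =>
      intro p hp hc
      refine ih _ ?_ hc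
      intro d hd
      by_cases hs : PySem.Chars.isspace a
      · exact hp d (by simpa [hs] using hd)
      · simp only [hs, Bool.false_eq_true, if_false] at hd
        cases hd
        simpa using hs

theorem nonspace_not_nl (p : Char) (hp : PySem.Chars.isspace p = false) :
    ['\n', '\r', '\t'].contains p = false := by
  by_contra h
  simp only [Bool.not_eq_false, List.contains_eq_mem, decide_eq_true_eq, List.mem_cons,
    List.not_mem_nil, or_false] at h
  rcases h with h | h | h <;> subst h <;> simp [PySem.Chars.isspace] at hp

theorem contains_dash (p : Char) :
    (['(', '[', '{'].contains p || p == '-') = ['(', '[', '{', '-'].contains p := by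
  simp [List.contains_eq_mem, List.mem_cons, Bool.beq_eq_decide_eq, Bool.or_assoc]

theorem aIsOpen_eq (prev nx : Option Char)
    (hp : ∀ d, prev = some d → PySem.Chars.isspace d = false) :
    aIsOpen prev nx = bOpen prev nx := by
  cases prev with
  | none =>
      cases nx with
      | none => simp [aIsOpen, bOpen]
      | some x =>
          simp only [aIsOpen, bOpen, Option.elim, Option.isNone_none, Option.isNone_some,
            Bool.false_or, Bool.true_or, Bool.true_and]
          by_cases hx : [')', ']', '}', '.', ',', ':', ';', '!', '?'].contains x = true
          · simp only [hx]; simp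
          · simp only [Bool.not_eq_true] at hx
            simp only [hx]; simp
  | some p =>
      have hnl := nonspace_not_nl p (hp p rfl)
      cases nx with
      | none => simp [aIsOpen, bOpen]
      | some x =>
          simp only [aIsOpen, bOpen, Option.elim, Option.isNone_some, Bool.false_or, hnl,
            Bool.or_false]
          by_cases hx : [')', ']', '}', '.', ',', ':', ';', '!', '?'].contains x = true
          · simp only [hx]; simp
          · simp only [Bool.not_eq_true] at hx
            simp only [hx]
            rw [if_neg (by simp), contains_dash]
            simp

-- A's character at a quote position, in terms of the running state
theorem aChar_quote (t : List Char) (i : Nat) (ch : Char) (hi : i ≤ t.length)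
    (hq : ch = '"' ∨ ch = '\'') :
    aChar t i ch = bPickQuote ch (prevState (t.take i)) (aNextNS t (i + 1)) := by
  have hprev := aPrevNS_eq_prevState t i hi
  have hopen := aIsOpen_eq (prevState (t.take i)) (aNextNS t (i + 1))
      (fun d hd => prevState_nonspace _ d hd)
  rcases hq with hq | hq
  · subst hq
    simp only [aChar, bPickQuote, if_pos rfl, hprev, hopen]
    simp
  · subst hq
    simp only [aChar, bPickQuote, if_neg (by decide : ¬('\'' = '"')), hprev, hopen]
    by_cases ha : (prevState (t.take i)).elim false PySem.Chars.isalnum &&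
        (aNextNS t (i + 1)).elim false PySem.Chars.isalnum
    · simp [ha]
    · simp [ha]

theorem aChar_not_quote (t : List Char) (i : Nat) (ch : Char)
    (h1 : ¬ ch = '"') (h2 : ¬ ch = '\'') : aChar t i ch = ch := by
  simp [aChar, h1, h2]

-- rstrip peels trailing whitespace
theorem rstrip_append_singleton (l : List Char) (c : Char) :
    PySem.Chars.rstrip (l ++ [c]) =
      if PySem.Chars.isspace c then PySem.Chars.rstrip l else l ++ [c] := by
  by_cases hs : PySem.Chars.isspace c <;>
    simp [PySem.Chars.rstrip, List.dropWhile_cons, hs]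

-- the `s = seg.rstrip(); if s: prev = s[-1]` update IS the char-by-char fold
theorem rstrip_last_eq_fold (l : List Char) (p : Option Char) :
    (if (PySem.Chars.rstrip l).isEmpty then p else some ((PySem.Chars.rstrip l).getLastD ' ')) =
      l.foldl (fun q c => if PySem.Chars.isspace c then q else some c) p := by
  induction l using List.reverseRecOn generalizing p with
  | nil => simp [PySem.Chars.rstrip]
  | append_singleton l c ih =>
      rw [rstrip_append_singleton, List.foldl_append]
      by_cases hs : PySem.Chars.isspace c
      · simp only [hs, if_pos, List.foldl_cons, List.foldl_nil]
        exact ih p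
      · simp [hs]

-- range'-indexed reading of a sublist
theorem map_getD_range' (t : List Char) :
    ∀ m k, k + m ≤ t.length →
      (List.range' k m).map (fun i => t.getD i ' ') = (t.drop k).take m := by
  intro m
  induction m with
  | zero => intro k _; simp
  | succ m ih =>
      intro k hk
      have hklt : k < t.length := by omega
      rw [List.range'_succ, List.map_cons, List.drop_eq_getElem_cons hklt]
      have hg : t.getD k ' ' = t[k] := by simp [List.getD_eq_getElem?_getD, hklt]
      rw [hg, List.take_succ_cons]
      congr 1
      exact ih (k + 1) (by omega)

-- what a -1 / non -1 result of one str.find means, character-wise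
theorem find_none (t : List Char) (c : Char) (i : Nat) (hi : i ≤ t.length)
    (h : PySem.Chars.findFrom t [c] (i : Int) none = -1) :
    ∀ idx, i ≤ idx → t[idx]? ≠ some c := by
  intro idx hidx hc
  have hl : idx < t.length := by
    by_contra hn
    rw [List.getElem?_eq_none (by omega)] at hc
    cases hc
  rw [List.getElem?_eq_getElem hl] at hc
  have hni := (PySem.Chars.findFrom_natCast_eq_neg_one_iff t [c] i hi).mp h
  apply hni
  rw [List.singleton_infix_iff]
  have hmem : t[idx] ∈ t.drop i := by
    have : (t.drop i)[idx - i]'(by simp; omega) ∈ t.drop i := List.getElem_mem _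
    simpa [List.getElem_drop, Nat.add_sub_cancel' hidx] using this
  rw [← (Option.some.injEq _ _).mp hc]
  exact hmem

theorem find_some (t : List Char) (c : Char) (i : Nat) (hi : i ≤ t.length)
    (h : PySem.Chars.findFrom t [c] (i : Int) none ≠ -1) :
    let r := (PySem.Chars.findFrom t [c] (i : Int) none).toNat
    (PySem.Chars.findFrom t [c] (i : Int) none) = (r : Int) ∧
    i ≤ r ∧ r < t.length ∧ t[r]? = some c ∧
    (∀ idx, i ≤ idx → idx < r → t[idx]? ≠ some c) := by
  obtain ⟨h1, h2, h3⟩ := PySem.Chars.findFrom_natCast_spec t [c] i hi h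
  set f := PySem.Chars.findFrom t [c] (i : Int) none with hf
  have hcast : f = (f.toNat : Int) := by omega
  have hrlen : f.toNat < t.length := by
    rcases h2 with ⟨tail, htail⟩
    have := congrArg List.length htail
    simp [List.length_drop] at this
    omega
  refine ⟨hcast, by omega, hrlen, ?_, ?_⟩
  · rcases h2 with ⟨tail, htail⟩
    rw [List.drop_eq_getElem_cons hrlen] at htail
    rw [List.getElem?_eq_getElem hrlen, ((List.cons.injEq _ _ _ _).mp htail).1]
  · intro idx hidx hlt hc
    have hl : idx < t.length := by omega
    rw [List.getElem?_eq_getElem hl] at hc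
    apply h3 idx hidx hlt
    rw [List.drop_eq_getElem_cons hl, (Option.some.injEq _ _).mp hc]
    exact ⟨_, rfl⟩

-- the combined `j = min of the two finds` step of B
theorem quote_min_spec (t : List Char) (i : Nat) (hi : i ≤ t.length) (jd js j : Int)
    (hjd : jd = PySem.Chars.findFrom t ['"'] (i : Int) none)
    (hjs : js = PySem.Chars.findFrom t ['\''] (i : Int) none)
    (hj : j = if jd = -1 then js else if js = -1 then jd else (if jd < js then jd else js))
    (hj1 : j ≠ -1) :
    j = (j.toNat : Int) ∧ i ≤ j.toNat ∧ j.toNat < t.length ∧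
    (t[j.toNat]? = some '"' ∨ t[j.toNat]? = some '\'') ∧
    (∀ idx, i ≤ idx → idx < j.toNat → t[idx]? ≠ some '"' ∧ t[idx]? ≠ some '\'') := by
  by_cases h1 : jd = -1
  · have h2 : js ≠ -1 := fun hh => hj1 (by rw [hj, if_pos h1]; exact hh)
    rw [hjs] at h2
    obtain ⟨hc, hle, hlen, hq, hmin⟩ := find_some t '\'' i hi h2
    have hjj : j = js := by rw [hj, if_pos h1]
    rw [hjj, hjs]
    refine ⟨hc, hle, hlen, Or.inr hq, ?_⟩
    intro idx hidx hlt
    exact ⟨find_none t '"' i hi (hjd ▸ h1) idx hidx, hmin idx hidx hlt⟩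
  · rw [hjd] at h1
    obtain ⟨hcd, hled, hlend, hqd, hmind⟩ := find_some t '"' i hi h1
    by_cases h2 : js = -1
    · have hjj : j = jd := by rw [hj, if_neg (hjd ▸ h1), if_pos h2]
      rw [hjj, hjd]
      refine ⟨hcd, hled, hlend, Or.inl hqd, ?_⟩
      intro idx hidx hlt
      exact ⟨hmind idx hidx hlt, find_none t '\'' i hi (hjs ▸ h2) idx hidx⟩
    · rw [hjs] at h2
      obtain ⟨hcs, hles, hlens, hqs, hmins⟩ := find_some t '\'' i hi h2
      have hjj : j = if jd < js then jd else js := by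
        rw [hj, if_neg (hjd ▸ h1), if_neg (hjs ▸ h2)]
      by_cases hlt : jd < js
      · have hjj2 : j = jd := by rw [hjj, if_pos hlt]
        rw [hjj2, hjd]
        refine ⟨hcd, hled, hlend, Or.inl hqd, ?_⟩
        intro idx hidx hlt'
        refine ⟨hmind idx hidx hlt', hmins idx hidx ?_⟩
        rw [hjd, hjs] at hlt; omega
      · have hjj2 : j = js := by rw [hjj, if_neg hlt]
        rw [hjj2, hjs]
        refine ⟨hcs, hles, hlens, Or.inr hqs, ?_⟩
        intro idx hidx hlt'
        refine ⟨hmind idx hidx ?_, hmins idx hidx hlt'⟩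
        rw [hjd, hjs] at hlt; omega

-- the per-index reading of A's output from position k on
def specMap (t : List Char) (k : Nat) : List Char :=
  (List.range' k (t.length - k)).map (fun i => aChar t i (t.getD i ' '))

theorem specMap_no_quotes (t : List Char) (k : Nat) (hk : k ≤ t.length)
    (hnq : ∀ idx, k ≤ idx → t[idx]? ≠ some '"' ∧ t[idx]? ≠ some '\'') :
    specMap t k = t.drop k := by
  unfold specMap
  have hcong : ∀ i ∈ List.range' k (t.length - k),
      aChar t i (t.getD i ' ') = t.getD i ' ' := by
    intro i hmem
    rw [List.mem_range'_1] at hmem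
    have hl : i < t.length := by omega
    have hg : t.getD i ' ' = t[i] := by simp [List.getD_eq_getElem?_getD, hl]
    obtain ⟨hq1, hq2⟩ := hnq i hmem.1
    rw [List.getElem?_eq_getElem hl] at hq1 hq2
    rw [hg, aChar_not_quote t i _ (by simpa using hq1) (by simpa using hq2)]
  rw [List.map_congr_left hcong]
  have := map_getD_range' t (t.length - k) k (by omega)
  rw [this, List.take_of_length_le (by simp)]

-- main loop invariant: bGo from position i with the running state equals A from position i
theorem bGo_eq_specMap (t : List Char) :
    ∀ fuel i, i ≤ t.length → t.length - i < fuel →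
      bGo t (prevState (t.take i)) i fuel = specMap t i := by
  intro fuel
  induction fuel with
  | zero => intro i _ h; omega
  | succ fuel ih =>
      intro i hi hfuel
      rw [bGo]
      set jd := PySem.Chars.findFrom t ['"'] (i : Int) none with hjd
      set js := PySem.Chars.findFrom t ['\''] (i : Int) none with hjs
      set j : Int := if jd = -1 then js else if js = -1 then jd else (if jd < js then jd else js) with hj
      by_cases hj1 : j = -1
      · -- no quote from i on
        have hboth : jd = -1 ∧ js = -1 := by
          by_cases h1 : jd = -1
          · exact ⟨h1, by rw [hj, if_pos h1] at hj1; exact hj1⟩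
          · exfalso
            by_cases h2 : js = -1
            · rw [hj, if_neg h1, if_pos h2] at hj1; exact h1 hj1
            · have hd := (find_some t '"' i hi (hjd ▸ h1)).1
              have hs := (find_some t '\'' i hi (hjs ▸ h2)).1
              rw [hj, if_neg h1, if_neg h2] at hj1
              rw [← hjd] at hd; rw [← hjs] at hs
              split at hj1 <;> omega
        rw [if_pos hj1]
        refine (specMap_no_quotes t i hi ?_).symm
        intro idx hidx
        exact ⟨find_none t '"' i hi (hjd ▸ hboth.1) idx hidx,
               find_none t '\'' i hi (hjs ▸ hboth.2) idx hidx⟩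
      · -- quote at jn = j.toNat
        rw [if_neg hj1]
        obtain ⟨hjcast0, hle, hl, hq?, hmin?⟩ := quote_min_spec t i hi jd js j hjd hjs hj hj1
        set jn := j.toNat with hjn
        have hq : t[jn]'hl = '"' ∨ t[jn]'hl = '\'' := by
          rcases hq? with h | h <;> rw [List.getElem?_eq_getElem hl] at h
          · exact Or.inl ((Option.some.injEq _ _).mp h)
          · exact Or.inr ((Option.some.injEq _ _).mp h)
        have hmin : ∀ idx, i ≤ idx → idx < jn → ∀ (hl' : idx < t.length),
            t[idx] ≠ '"' ∧ t[idx] ≠ '\'' := by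
          intro idx h1 h2 hl'
          obtain ⟨ha, hb⟩ := hmin? idx h1 h2
          rw [List.getElem?_eq_getElem hl'] at ha hb
          exact ⟨by simpa using ha, by simpa using hb⟩
        have hjcast : j = (jn : Int) := hjcast0
        -- the quote-free segment
        have hseg : PySem.Chars.slice t (some (i : Int)) (some j) = (t.drop i).take (jn - i) := by
          rw [hjcast]
          simpa using PySem.List.slice_natCast t i jn
        -- split specMap at jn and at jn+1
        have hsplit : specMap t i =
            (List.range' i (jn - i)).map (fun idx => aChar t idx (t.getD idx ' ')) ++
            aChar t jn (t.getD jn ' ') :: specMap t (jn + 1) := by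
          unfold specMap
          rw [show t.length - i = (jn - i) + (t.length - jn) by omega, ← List.range'_append_1,
            show i + (jn - i) = jn by omega,
            show t.length - jn = (t.length - (jn + 1)) + 1 by omega, List.range'_succ,
            List.map_append, List.map_cons]
        rw [hsplit]
        -- segment part
        have hsegmap : (List.range' i (jn - i)).map (fun idx => aChar t idx (t.getD idx ' ')) =
            (t.drop i).take (jn - i) := by
          have hcong : ∀ idx ∈ List.range' i (jn - i),
              aChar t idx (t.getD idx ' ') = t.getD idx ' ' := by
            intro idx hmem
            rw [List.mem_range'_1] at hmem
            have hl' : idx < t.length := by omega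
            have hg : t.getD idx ' ' = t[idx] := by simp [List.getD_eq_getElem?_getD, hl']
            obtain ⟨hq1, hq2⟩ := hmin idx hmem.1 (by omega) hl'
            rw [hg, aChar_not_quote t idx _ hq1 hq2]
          rw [List.map_congr_left hcong]
          exact map_getD_range' t (jn - i) i (by omega)
        -- the quote character itself
        have hgj : t.getD jn ' ' = t[jn] := by simp [List.getD_eq_getElem?_getD, hl]
        have hprev' : (if (PySem.Chars.rstrip ((t.drop i).take (jn - i))).isEmpty then prevState (t.take i)
              else some ((PySem.Chars.rstrip ((t.drop i).take (jn - i))).getLastD ' ')) =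
            prevState (t.take jn) := by
          rw [rstrip_last_eq_fold]
          rw [show t.take jn = t.take i ++ (t.drop i).take (jn - i) by
            rw [← List.take_add]; congr 1; omega]
          simp [prevState, List.foldl_append]
        have hquote : bPickQuote (t[jn]'hl) (prevState (t.take jn)) (bNextNS t (jn + 1)) =
            aChar t jn (t.getD jn ' ') := by
          rw [hgj, aChar_quote t jn (t[jn]'hl) (by omega) hq, bNextNS_eq_aNextNS]
        -- the tail via the induction hypothesis
        have hspace : PySem.Chars.isspace (t[jn]'hl) = false := by
          rcases hq with hq | hq <;> rw [hq] <;> decide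
        have htailstate : some (t[jn]'hl) = prevState (t.take (jn + 1)) := by
          rw [List.take_succ_eq_append_getElem hl, prevState_append_singleton, hspace]
          simp
        have htail := ih (jn + 1) (by omega) (by omega)
        rw [← htailstate] at htail
        simp only [hseg, hsegmap, hprev', hgj, hquote, htail]

-- ===== VERDICT (by name: the statement is the Claim_ definition above) =====
theorem smart_quotes_py_spec : Claim_equal_smart_quotes_py := by
  intro text _
  unfold Spec_smart_quotes_py smart_quotes_py smart_quotes_py_alt
  have h := bGo_eq_specMap text.toList (text.toList.length + 1) 0 (Nat.zero_le _) (by omega)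
  rw [show prevState (text.toList.take 0) = none from rfl] at h
  rw [h]
  unfold specMap
  rw [Nat.sub_zero, ← List.range_eq_range']
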